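-- pv_equiv track=rewrite | github.com/LuoXukun/nlp_event_extraction | ee_mrc/code/utils.py | calculate_cpg_io
-- ===== SOURCE A (Python) =====
-- def calculate_cpg_io(input):
--     """ return number of correct, predict, gold and positions
--         used for in/out
--     """
--     def return_zip_start_end(labels):
--         pair = []
--         ix = 0
--         while ix < len(labels):
--             if labels[ix]:
--                 s, e = ix, ix + 1
--                 while e < len(labels) and labels[e]:
--                     e += 1
--                 ix = e
--                 pair.append((s, e - 1))
--             else:
--                 ix += 1
--         return pair
--
--     pred_zip = return_zip_start_end(input[0])
--     gold_zip = return_zip_start_end(input[1])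
--     correct = 0
--     # pred has no start/end
--     if not pred_zip:
--         return 0, 0, len(gold_zip), [], gold_zip
--
--     else:
--         for pair in pred_zip:
--             if pair in gold_zip:
--                 correct += 1
--         return correct, len(pred_zip), len(gold_zip), pred_zip, gold_zip
-- ===== SOURCE B (Python) =====
-- def calculate_cpg_io(input):
--     """Index-set formulation: collect truthy positions, derive run starts/ends from
--     consecutiveness breaks in the index list, and count correct spans as the size of
--     the set intersection of pred and gold span sets."""
--     def spans(labels):
--         idxs = [i for i, v in enumerate(labels) if v]
--         starts = [b for a, b in zip([-2] + idxs, idxs) if b != a + 1]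
--         ends = [a for a, b in zip(idxs, idxs[1:] + [-2]) if b != a + 1]
--         return list(zip(starts, ends))
--
--     pred_zip = spans(input[0])
--     gold_zip = spans(input[1])
--     correct = len(set(pred_zip) & set(gold_zip))
--     return correct, len(pred_zip), len(gold_zip), pred_zip, gold_zip
-- ===== Notes on version B (the rewrite author's own statement) =====
-- stated objective: alternative
-- what changed: Replaced A's nested while-loops (outer position scan with an inner run-extension loop) by an index-set formulation: collect the list of truthy positions, read run starts and ends off the consecutiveness breaks of that list by zipping it with its shifted self, and count correct spans as the cardinality of the set intersection of the pred and gold span sets instead of a per-span membership loop.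
import Mathlib
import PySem

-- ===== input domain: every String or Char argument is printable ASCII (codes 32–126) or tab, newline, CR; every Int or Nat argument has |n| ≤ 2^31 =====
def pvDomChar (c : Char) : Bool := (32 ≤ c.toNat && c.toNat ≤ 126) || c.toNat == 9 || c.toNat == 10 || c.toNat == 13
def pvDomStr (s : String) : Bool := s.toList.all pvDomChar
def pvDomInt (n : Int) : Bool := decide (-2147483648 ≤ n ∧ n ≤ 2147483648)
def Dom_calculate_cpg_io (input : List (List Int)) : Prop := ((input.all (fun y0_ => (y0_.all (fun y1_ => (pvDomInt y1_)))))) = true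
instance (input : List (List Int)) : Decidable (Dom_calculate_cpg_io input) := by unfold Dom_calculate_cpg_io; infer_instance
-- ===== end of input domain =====

-- B computes spans from the LIST OF TRUTHY INDICES (starts/ends are the consecutiveness breaks
-- of that index list, read off by zipping it with its shifted self) instead of A's nested
-- while-loops over positions, and counts correct spans as the size of the intersection of the
-- two span sets; same return value wherever A returns (Pre_: len(input) ≥ 2).

-- ===== PORT A =====
-- inner 'while e < len(labels) and labels[e]: e += 1' of A; fuel bounds the remaining steps (totality guard only)
def pvAExtGo (labels : List Int) : Nat → Nat → Nat
  | 0, e => e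
  | fuel + 1, e => if e < labels.length ∧ labels.getD e 0 ≠ 0 then pvAExtGo labels fuel (e + 1) else e

def pvAExt (labels : List Int) (e : Nat) : Nat := pvAExtGo labels (labels.length - e) e

-- outer 'while ix < len(labels)' loop of A, accumulating 'pair'; fuel bounds the remaining steps (totality guard only)
def pvAZipGo (labels : List Int) : Nat → Nat → List (Int × Int) → List (Int × Int)
  | 0, _, pair => pair
  | fuel + 1, ix, pair =>
    if ix < labels.length then
      if labels.getD ix 0 ≠ 0 then
        pvAZipGo labels fuel (pvAExt labels (ix + 1))
          (pair ++ [((ix : Int), (pvAExt labels (ix + 1) : Int) - 1)])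
      else pvAZipGo labels fuel (ix + 1) pair
    else pair

def pvAZip (labels : List Int) : List (Int × Int) := pvAZipGo labels labels.length 0 []

def calculate_cpg_io (input : List (List Int)) : Int × Int × Int × (List (Int × Int)) × (List (Int × Int)) :=
  let pred_zip := pvAZip (input.getD 0 [])
  let gold_zip := pvAZip (input.getD 1 [])
  if pred_zip = [] then
    (0, 0, (gold_zip.length : Int), [], gold_zip)
  else
    (pred_zip.foldl (fun c pair => if pair ∈ gold_zip then c + 1 else c) (0 : Int),
     (pred_zip.length : Int), (gold_zip.length : Int), pred_zip, gold_zip)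

-- ===== PORT B =====
-- '[i for i, v in enumerate(labels) if v]', generalized over the enumerate start (B calls it with 0)
def pvIdxsF (labels : List Int) (n : Int) : List Int :=
  ((PySem.List.enumerate labels n).filter (fun p => decide (p.2 ≠ 0))).map Prod.fst

-- '[b for a, b in zip([-2] + idxs, idxs) if b != a + 1]'
def pvStarts (idxs : List Int) : List Int :=
  ((((-2 : Int) :: idxs).zip idxs).filter (fun ab => decide (ab.2 ≠ ab.1 + 1))).map Prod.snd

-- '[a for a, b in zip(idxs, idxs[1:] + [-2]) if b != a + 1]'  (idxs[1:] = drop 1: exact, the start 1 is a literal nonneg index)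
def pvEnds (idxs : List Int) : List Int :=
  ((idxs.zip (idxs.drop 1 ++ [(-2 : Int)])).filter (fun ab => decide (ab.2 ≠ ab.1 + 1))).map Prod.fst

def pvSpans (labels : List Int) : List (Int × Int) :=
  (pvStarts (pvIdxsF labels 0)).zip (pvEnds (pvIdxsF labels 0))

def calculate_cpg_io_alt (input : List (List Int)) : Int × Int × Int × (List (Int × Int)) × (List (Int × Int)) :=
  let pred_zip := pvSpans (input.getD 0 [])
  let gold_zip := pvSpans (input.getD 1 [])
  let correct : Int :=
    ((PySem.Set.inter (PySem.Set.ofList pred_zip) (PySem.Set.ofList gold_zip)).length : Int)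
  (correct, (pred_zip.length : Int), (gold_zip.length : Int), pred_zip, gold_zip)

-- ===== PRECONDITION & SPEC =====
-- Pre_ excludes only inputs with fewer than two label lists, on which A raises IndexError (input[0]/input[1]).
def Pre_calculate_cpg_io (input : List (List Int)) : Prop := 2 ≤ input.length
instance (input : List (List Int)) : Decidable (Pre_calculate_cpg_io input) := by unfold Pre_calculate_cpg_io; infer_instance
def pvWitness_calculate_cpg_io : List (List Int) := [[1, 1, 0, 2], [1, 0, 0, 2]]

def Spec_calculate_cpg_io (input : List (List Int)) (out : Int × Int × Int × (List (Int × Int)) × (List (Int × Int))) : Prop := out = calculate_cpg_io_alt input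
instance (input : List (List Int)) (out : Int × Int × Int × (List (Int × Int)) × (List (Int × Int))) : Decidable (Spec_calculate_cpg_io input out) := by unfold Spec_calculate_cpg_io; infer_instance

-- ===== CLAIM (what is proved, stated in full; the proofs are below) =====
def Claim_equal_calculate_cpg_io : Prop := ∀ (input : List (List Int)), Dom_calculate_cpg_io input → Pre_calculate_cpg_io input → Spec_calculate_cpg_io input (calculate_cpg_io input)

-- ===== LEMMAS AND PROOFS =====

-- common characterisation of a run-list, structural in the label list, carrying the open-run start
def pvSpec : List Int → Int → Option Int → List (Int × Int)
  | [], _, none => []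
  | [], n, some s => [(s, n - 1)]
  | x :: xs, n, none => if x ≠ 0 then pvSpec xs (n + 1) (some n) else pvSpec xs (n + 1) none
  | x :: xs, n, some s => if x ≠ 0 then pvSpec xs (n + 1) (some s) else (s, n - 1) :: pvSpec xs (n + 1) none

-- ---- A-side: the nested while-loops compute pvSpec ----

theorem pvAExt_stop (labels : List Int) (e : Nat)
    (h : ¬(e < labels.length ∧ labels.getD e 0 ≠ 0)) : pvAExt labels e = e := by
  unfold pvAExt
  cases hf : labels.length - e with
  | zero => rfl
  | succ f =>
    simp only [pvAExtGo]
    rw [if_neg h]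

theorem pvAExt_step (labels : List Int) (e : Nat)
    (h : e < labels.length ∧ labels.getD e 0 ≠ 0) : pvAExt labels e = pvAExt labels (e + 1) := by
  unfold pvAExt
  have hf : labels.length - e = (labels.length - (e + 1)) + 1 := by omega
  rw [hf]
  simp only [pvAExtGo]
  rw [if_pos h]

theorem pvAExtGo_ge (labels : List Int) (f : Nat) : ∀ (e : Nat), e ≤ pvAExtGo labels f e := by
  induction f with
  | zero => intro e; simp [pvAExtGo]
  | succ f ih =>
    intro e
    simp only [pvAExtGo]
    split
    · exact le_trans (Nat.le_succ e) (ih (e + 1))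
    · exact le_refl e

theorem pvAExt_ge (labels : List Int) (e : Nat) : e ≤ pvAExt labels e :=
  pvAExtGo_ge labels (labels.length - e) e

theorem pvAExtGo_le (labels : List Int) (f : Nat) : ∀ (e : Nat), pvAExtGo labels f e ≤ e + f := by
  induction f with
  | zero => intro e; simp [pvAExtGo]
  | succ f ih =>
    intro e
    simp only [pvAExtGo]
    split
    · exact le_trans (ih (e + 1)) (by omega)
    · omega

theorem pvAExt_le (labels : List Int) (e : Nat) (h : e ≤ labels.length) :
    pvAExt labels e ≤ labels.length := by
  have := pvAExtGo_le labels (labels.length - e) e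
  unfold pvAExt
  omega

theorem pvDrop_cons (labels : List Int) (j : Nat) (hlt : j < labels.length) :
    labels.drop j = labels.getD j 0 :: labels.drop (j + 1) := by
  have h1 : labels.getD j 0 = labels[j] := by
    simp [List.getD_eq_getElem?_getD, List.getElem?_eq_getElem hlt]
  rw [List.drop_eq_getElem_cons hlt, h1]

theorem pvA_some (m : Nat) : ∀ (labels : List Int) (j : Nat) (s : Int),
    labels.length - j ≤ m → j ≤ labels.length →
    pvSpec (labels.drop j) (j : Int) (some s)
      = ((s, (pvAExt labels j : Int) - 1)) :: pvSpec (labels.drop (pvAExt labels j)) ((pvAExt labels j : Int)) none := by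
  induction m with
  | zero =>
    intro labels j s hm hj
    rw [pvAExt_stop labels j (by rintro ⟨h1, -⟩; omega), List.drop_of_length_le (by omega)]
    simp [pvSpec]
  | succ m ih =>
    intro labels j s hm hj
    by_cases hlt : j < labels.length
    · have hdrop := pvDrop_cons labels j hlt
      by_cases hx : labels.getD j 0 ≠ 0
      · rw [pvAExt_step labels j ⟨hlt, hx⟩, hdrop]
        simp only [pvSpec]
        rw [if_pos hx]
        have := ih labels (j + 1) s (by omega) (by omega)
        push_cast at this ⊢
        exact this
      · rw [pvAExt_stop labels j (by rintro ⟨-, h2⟩; exact hx h2), hdrop]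
        simp only [pvSpec, if_neg hx]
    · rw [pvAExt_stop labels j (by rintro ⟨h1, -⟩; omega), List.drop_of_length_le (by omega)]
      simp [pvSpec]

theorem pvA_none (f : Nat) : ∀ (labels : List Int) (j : Nat) (pair : List (Int × Int)),
    labels.length - j ≤ f →
    pvAZipGo labels f j pair = pair ++ pvSpec (labels.drop j) (j : Int) none := by
  induction f with
  | zero =>
    intro labels j pair hm
    rw [List.drop_of_length_le (by omega)]
    simp [pvAZipGo, pvSpec]
  | succ f ih =>
    intro labels j pair hm
    by_cases hlt : j < labels.length
    · have hdrop := pvDrop_cons labels j hlt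
      by_cases hx : labels.getD j 0 ≠ 0
      · simp only [pvAZipGo]
        rw [if_pos hlt, if_pos hx]
        set e := pvAExt labels (j + 1) with he
        have hge2 : j + 1 ≤ e := he ▸ pvAExt_ge labels (j + 1)
        have hle2 : e ≤ labels.length := he ▸ pvAExt_le labels (j + 1) (by omega)
        rw [ih labels e (pair ++ [((j : Int), (e : Int) - 1)]) (by omega)]
        rw [hdrop]
        simp only [pvSpec]
        rw [if_pos hx]
        have hs := pvA_some f labels (j + 1) (j : Int) (by omega) (by omega)
        rw [← he] at hs
        push_cast at hs ⊢
        rw [hs]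
        simp
      · simp only [pvAZipGo]
        rw [if_pos hlt, if_neg hx, ih labels (j + 1) pair (by omega), hdrop]
        simp only [pvSpec, if_neg hx]
        push_cast
        rfl
    · simp only [pvAZipGo]
      rw [if_neg hlt, List.drop_of_length_le (by omega)]
      simp [pvSpec]

theorem pvAZip_eq_spec (labels : List Int) : pvAZip labels = pvSpec labels 0 none := by
  have hA := pvA_none labels.length labels 0 [] (by omega)
  simpa using hA

-- ---- B-side: index-list breaks compute pvSpec too ----

theorem pvIdxsF_cons (x : Int) (xs : List Int) (n : Int) :
    pvIdxsF (x :: xs) n = if x ≠ 0 then n :: pvIdxsF xs (n + 1) else pvIdxsF xs (n + 1) := by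
  unfold pvIdxsF
  rw [PySem.List.enumerate_cons, List.filter_cons]
  by_cases hx : x ≠ 0 <;> simp [hx]

theorem pvIdxsF_ge (xs : List Int) : ∀ (n : Int), ∀ i ∈ pvIdxsF xs n, n ≤ i := by
  induction xs with
  | nil => intro n i hi; simp [pvIdxsF, PySem.List.enumerate_nil] at hi
  | cons x xs ih =>
    intro n i hi
    rw [pvIdxsF_cons] at hi
    by_cases hx : x ≠ 0
    · rw [if_pos hx] at hi
      rcases List.mem_cons.mp hi with h | h
      · omega
      · have := ih (n + 1) i h; omega
    · rw [if_neg hx] at hi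
      have := ih (n + 1) i hi; omega

-- recursion form of the starts comprehension, carrying the previous index
def pvStartsGo (p : Int) : List Int → List Int
  | [] => []
  | i :: rest => (if i ≠ p + 1 then [i] else []) ++ pvStartsGo i rest

theorem pvStarts_go (idxs : List Int) : ∀ (p : Int),
    (((p :: idxs).zip idxs).filter (fun ab => decide (ab.2 ≠ ab.1 + 1))).map Prod.snd
      = pvStartsGo p idxs := by
  induction idxs with
  | nil => intro p; simp [pvStartsGo]
  | cons i rest ih =>
    intro p
    rw [List.zip_cons_cons, List.filter_cons]
    by_cases h : i = p + 1
    · rw [if_neg (by simp [h]), ih i]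
      simp only [pvStartsGo]
      rw [if_neg (not_not_intro h), List.nil_append]
    · rw [if_pos (by simp [h]), List.map_cons, ih i]
      simp only [pvStartsGo]
      rw [if_pos h]
      rfl

theorem pvStarts_eq (idxs : List Int) : pvStarts idxs = pvStartsGo (-2) idxs :=
  pvStarts_go idxs (-2)

-- recursion form of the ends comprehension, looking ahead one index
def pvEndsGo : List Int → List Int
  | [] => []
  | [i] => if (-2 : Int) ≠ i + 1 then [i] else []
  | i :: j :: rest => (if j ≠ i + 1 then [i] else []) ++ pvEndsGo (j :: rest)

theorem pvEnds_eq (idxs : List Int) : pvEnds idxs = pvEndsGo idxs := by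
  induction idxs with
  | nil => simp [pvEnds, pvEndsGo]
  | cons i rest ih =>
    cases rest with
    | nil =>
      simp only [pvEnds, pvEndsGo, List.drop_one, List.tail_cons, List.nil_append]
      rw [List.zip_cons_cons, List.zip_nil_left, List.filter_cons]
      by_cases h : (-2 : Int) = i + 1
      · rw [if_neg (by simp [h]), if_neg (not_not_intro h)]
        rfl
      · rw [if_pos (by simp [h]), if_pos h]
        rfl
    | cons j rest' =>
      simp only [pvEnds, List.drop_one, List.tail_cons] at ih ⊢
      rw [List.cons_append, List.zip_cons_cons, List.filter_cons]
      by_cases h : j = i + 1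
      · rw [if_neg (by simp [h]), ih]
        simp only [pvEndsGo]
        rw [if_neg (not_not_intro h), List.nil_append]
      · rw [if_pos (by simp [h]), List.map_cons, ih]
        simp only [pvEndsGo]
        rw [if_pos h]
        rfl

theorem pvStarts_spec (xs : List Int) : ∀ (n : Int),
    (∀ p : Int, p + 1 < n → pvStartsGo p (pvIdxsF xs n) = (pvSpec xs n none).map Prod.fst) ∧
    (∀ s : Int, (pvSpec xs n (some s)).map Prod.fst = s :: pvStartsGo (n - 1) (pvIdxsF xs n)) := by
  induction xs with
  | nil =>
    intro n
    constructor
    · intro p _; simp [pvIdxsF, PySem.List.enumerate_nil, pvStartsGo, pvSpec]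
    · intro s; simp [pvIdxsF, PySem.List.enumerate_nil, pvStartsGo, pvSpec]
  | cons x xs ih =>
    intro n
    constructor
    · intro p hp
      rw [pvIdxsF_cons]
      by_cases hx : x ≠ 0
      · rw [if_pos hx]
        simp only [pvSpec, if_pos hx]
        rw [(ih (n + 1)).2 n]
        simp only [pvStartsGo]
        rw [if_pos (by omega : n ≠ p + 1)]
        have : n + 1 - 1 = n := by omega
        rw [this]
        rfl
      · rw [if_neg hx]
        simp only [pvSpec, if_neg hx]
        exact (ih (n + 1)).1 p (by omega)
    · intro s
      rw [pvIdxsF_cons]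
      by_cases hx : x ≠ 0
      · rw [if_pos hx]
        simp only [pvSpec, if_pos hx]
        rw [(ih (n + 1)).2 s]
        simp only [pvStartsGo]
        rw [if_neg (by omega : ¬ n ≠ (n - 1) + 1)]
        have : n + 1 - 1 = n := by omega
        rw [this]
        rfl
      · rw [if_neg hx]
        simp only [pvSpec, if_neg hx]
        rw [List.map_cons]
        rw [← (ih (n + 1)).1 (n - 1) (by omega)]

theorem pvEndsGo_cons_gap (l : List Int) (a : Int) (h1 : ∀ j ∈ l, a + 1 < j) (h2 : a ≠ -3) :
    pvEndsGo (a :: l) = a :: pvEndsGo l := by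
  cases l with
  | nil => simp only [pvEndsGo]; rw [if_pos (by omega : (-2 : Int) ≠ a + 1)]
  | cons j rest =>
    have hj : a + 1 < j := h1 j (List.mem_cons_self)
    simp only [pvEndsGo]
    rw [if_pos (by omega : j ≠ a + 1)]
    rfl

theorem pvEnds_spec (xs : List Int) : ∀ (n : Int), 0 ≤ n →
    (pvEndsGo (pvIdxsF xs n) = (pvSpec xs n none).map Prod.snd) ∧
    (∀ s : Int, (pvSpec xs n (some s)).map Prod.snd = pvEndsGo ((n - 1) :: pvIdxsF xs n)) := by
  induction xs with
  | nil =>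
    intro n hn
    constructor
    · simp [pvIdxsF, PySem.List.enumerate_nil, pvEndsGo, pvSpec]
    · intro s
      simp only [pvIdxsF, PySem.List.enumerate_nil, List.filter_nil, List.map_nil, pvSpec,
        pvEndsGo, List.map_cons]
      rw [if_pos (by omega : (-2 : Int) ≠ (n - 1) + 1)]
  | cons x xs ih =>
    intro n hn
    have ih' := ih (n + 1) (by omega)
    constructor
    · rw [pvIdxsF_cons]
      by_cases hx : x ≠ 0
      · rw [if_pos hx]
        simp only [pvSpec, if_pos hx]
        rw [ih'.2 n]
        have : n + 1 - 1 = n := by omega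
        rw [this]
      · rw [if_neg hx]
        simp only [pvSpec, if_neg hx]
        exact ih'.1
    · intro s
      rw [pvIdxsF_cons]
      by_cases hx : x ≠ 0
      · rw [if_pos hx]
        simp only [pvSpec, if_pos hx]
        rw [ih'.2 s]
        have h1 : n + 1 - 1 = n := by omega
        rw [h1]
        cases hc : pvIdxsF xs (n + 1) with
        | nil => simp only [pvEndsGo]; rw [if_neg (by omega : ¬ n ≠ (n - 1) + 1)]; rfl
        | cons j rest => simp only [pvEndsGo]; rw [if_neg (by omega : ¬ n ≠ (n - 1) + 1)]; rfl
      · rw [if_neg hx]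
        simp only [pvSpec, if_neg hx, List.map_cons]
        rw [← ih'.1]
        rw [pvEndsGo_cons_gap (pvIdxsF xs (n + 1)) (n - 1)
          (fun j hj => by have := pvIdxsF_ge xs (n + 1) j hj; omega) (by omega)]

theorem pvZip_fst_snd (l : List (Int × Int)) : (l.map Prod.fst).zip (l.map Prod.snd) = l := by
  induction l with
  | nil => rfl
  | cons p l ih => cases p; simp [ih]

theorem pvSpans_eq (labels : List Int) : pvSpans labels = pvAZip labels := by
  unfold pvSpans
  rw [pvStarts_eq, pvEnds_eq]
  rw [(pvStarts_spec labels 0).1 (-2) (by omega)]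
  rw [(pvEnds_spec labels 0 (by omega)).1]
  rw [pvZip_fst_snd, pvAZip_eq_spec]

-- the fsts of a run-list are strictly increasing, hence the list has no duplicates
theorem pvSpec_sorted (xs : List Int) : ∀ (n : Int),
    ((pvSpec xs n none).Pairwise (fun a b => a.1 < b.1) ∧ ∀ p ∈ pvSpec xs n none, n ≤ p.1) ∧
    (∀ s : Int, s < n →
      (pvSpec xs n (some s)).Pairwise (fun a b => a.1 < b.1) ∧
        ∀ p ∈ pvSpec xs n (some s), s = p.1 ∨ n ≤ p.1) := by
  induction xs with
  | nil =>
    intro n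
    refine ⟨⟨by simp [pvSpec], by simp [pvSpec]⟩, fun s hs => ⟨by simp [pvSpec], ?_⟩⟩
    intro p hp
    simp only [pvSpec, List.mem_singleton] at hp
    left; rw [hp]
  | cons x xs ih =>
    intro n
    constructor
    · by_cases hx : x ≠ 0
      · simp only [pvSpec, if_pos hx]
        obtain ⟨hpw, hmem⟩ := (ih (n + 1)).2 n (by omega)
        exact ⟨hpw, fun p hp => by rcases hmem p hp with h | h <;> omega⟩
      · simp only [pvSpec, if_neg hx]
        obtain ⟨hpw, hmem⟩ := (ih (n + 1)).1
        exact ⟨hpw, fun p hp => by have := hmem p hp; omega⟩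
    · intro s hs
      by_cases hx : x ≠ 0
      · simp only [pvSpec, if_pos hx]
        obtain ⟨hpw, hmem⟩ := (ih (n + 1)).2 s (by omega)
        exact ⟨hpw, fun p hp => by rcases hmem p hp with h | h <;> omega⟩
      · simp only [pvSpec, if_neg hx]
        obtain ⟨hpw, hmem⟩ := (ih (n + 1)).1
        refine ⟨List.pairwise_cons.mpr ⟨fun p hp => ?_, hpw⟩, ?_⟩
        · have := hmem p hp; simp; omega
        · intro p hp
          rcases List.mem_cons.mp hp with h | h
          · left; rw [h]
          · have := hmem p h; omega

theorem pvAZip_nodup (labels : List Int) : (pvAZip labels).Nodup := by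
  rw [pvAZip_eq_spec]
  have hpw := (pvSpec_sorted labels 0).1.1
  exact hpw.imp (fun {a b} h => by intro heq; rw [heq] at h; exact lt_irrefl _ h)

-- Set.inter s t is, definitionally, the elements of s lying in t (s's order)
theorem pvInter_def (s t : List (Int × Int)) :
    PySem.Set.inter s t = s.filter (fun x => PySem.Set.contains t x) := rfl

theorem pvContains_ofList (gold : List (Int × Int)) (x : Int × Int) :
    PySem.Set.contains (PySem.Set.ofList gold) x = decide (x ∈ gold) := by
  by_cases h : x ∈ gold
  · simp [PySem.Set.mem_ofList, h]
  · simp [h]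

theorem pvFoldl_count (gold : List (Int × Int)) : ∀ (l : List (Int × Int)) (c : Int),
    l.foldl (fun c pair => if pair ∈ gold then c + 1 else c) c
      = c + ((l.filter (fun p => decide (p ∈ gold))).length : Int) := by
  intro l
  induction l with
  | nil => intro c; simp
  | cons p l ih =>
    intro c
    rw [List.foldl_cons, List.filter_cons]
    by_cases hp : p ∈ gold
    · rw [if_pos hp, ih, if_pos (by simp [hp])]
      simp [List.length_cons]
      ring
    · rw [if_neg hp, ih, if_neg (by simp [hp])]

theorem pvCount_eq (l gold : List (Int × Int)) (hl : l.Nodup) :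
    l.foldl (fun c pair => if pair ∈ gold then c + 1 else c) (0 : Int)
      = ((PySem.Set.inter (PySem.Set.ofList l) (PySem.Set.ofList gold)).length : Int) := by
  have hself : PySem.Set.ofList l = l := PySem.Set.ofList_eq_self_of_nodup l hl
  rw [pvInter_def, hself]
  rw [List.filter_congr (fun x _ => pvContains_ofList gold x)]
  rw [pvFoldl_count gold l 0]
  simp

-- ===== VERDICT (by name: the statement is the Claim_ definition above) =====
theorem calculate_cpg_io_spec : Claim_equal_calculate_cpg_io := by
  intro input _hdom _hpre
  unfold Spec_calculate_cpg_io
  simp only [calculate_cpg_io, calculate_cpg_io_alt]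
  rw [pvSpans_eq, pvSpans_eq]
  set pred := pvAZip (input.getD 0 []) with hp
  set gold := pvAZip (input.getD 1 []) with hg
  by_cases h : pred = []
  · simp [h, pvInter_def]
  · rw [if_neg h, pvCount_eq pred gold (hp ▸ pvAZip_nodup _)]
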